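-- pv_equiv track=rewrite | github.com/lakshaychetal/astrologyfinalrk | utils/cache_manager.py | compute_intent_bucket
-- ===== SOURCE A (Python) =====
-- def compute_intent_bucket(question: str, niche: str) -> str:
--     """
--     Compute intent bucket from question
--
--     Buckets similar questions together for cache reuse
--
--     Args:
--         question: User's question
--         niche: Astrology niche
--
--     Returns:
--         Intent bucket string (e.g., "timing_marriage_love")
--     """
--     q_lower = question.lower()
--
--     # Timing questions
--     if any(w in q_lower for w in ["when", "timing", "date", "period"]):
--         if "marriage" in q_lower or "spouse" in q_lower:
--             return f"timing_marriage_{niche.lower().replace(' ', '_')}"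
--         elif "job" in q_lower or "career" in q_lower:
--             return f"timing_career_{niche.lower().replace(' ', '_')}"
--         else:
--             return f"timing_general_{niche.lower().replace(' ', '_')}"
--
--     # Appearance questions
--     elif any(w in q_lower for w in ["look", "appear", "beautiful", "handsome"]):
--         return f"appearance_spouse_{niche.lower().replace(' ', '_')}"
--
--     # Personality questions
--     elif any(w in q_lower for w in ["personality", "nature", "like", "character"]):
--         return f"personality_spouse_{niche.lower().replace(' ', '_')}"
--
--     # Location questions
--     elif "where" in q_lower or "meet" in q_lower:
--         return f"location_meeting_{niche.lower().replace(' ', '_')}"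
--
--     # General niche questions
--     else:
--         return f"general_{niche.lower().replace(' ', '_')}"
-- ===== SOURCE B (Python) =====
-- # B: instead of a first-match if/elif cascade, scan ALL keywords once against the
-- # question, collect the priorities of every matching keyword, and take the MINIMUM
-- # priority (lowest = highest precedence) to pick the bucket token.  Correct because
-- # A's chain returns the first matching group in a fixed order, which is exactly the
-- # group of minimal priority among all matching keywords.
--
-- _KW = {  # keyword -> category priority (1 timing, 2 appearance, 3 personality, 4 location)
--     "when": 1, "timing": 1, "date": 1, "period": 1,
--     "look": 2, "appear": 2, "beautiful": 2, "handsome": 2,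
--     "personality": 3, "nature": 3, "like": 3, "character": 3,
--     "where": 4, "meet": 4,
-- }
-- _SUB = {"marriage": 1, "spouse": 1, "job": 2, "career": 2}
-- _TIMING = ("timing_marriage", "timing_career", "timing_general")
-- _TOKEN = (None, "appearance_spouse", "personality_spouse", "location_meeting", "general")
--
--
-- def compute_intent_bucket(question: str, niche: str) -> str:
--     q = question.lower()
--     suffix = niche.lower().replace(' ', '_')
--     cat = min((p for w, p in _KW.items() if w in q), default=5)
--     if cat == 1:
--         sub = min((p for w, p in _SUB.items() if w in q), default=3)
--         token = _TIMING[sub - 1]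
--     else:
--         token = _TOKEN[cat - 1]
--     return f"{token}_{suffix}"
-- ===== Notes on version B (the rewrite author's own statement) =====
-- stated objective: alternative
-- what changed: Replaced A's first-match if/elif cascade with a flat keyword->priority map scanned in full: all matching keywords are collected and the minimum priority selects the bucket token (same for the timing sub-bucket), with the niche suffix computed once.
import Mathlib
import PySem

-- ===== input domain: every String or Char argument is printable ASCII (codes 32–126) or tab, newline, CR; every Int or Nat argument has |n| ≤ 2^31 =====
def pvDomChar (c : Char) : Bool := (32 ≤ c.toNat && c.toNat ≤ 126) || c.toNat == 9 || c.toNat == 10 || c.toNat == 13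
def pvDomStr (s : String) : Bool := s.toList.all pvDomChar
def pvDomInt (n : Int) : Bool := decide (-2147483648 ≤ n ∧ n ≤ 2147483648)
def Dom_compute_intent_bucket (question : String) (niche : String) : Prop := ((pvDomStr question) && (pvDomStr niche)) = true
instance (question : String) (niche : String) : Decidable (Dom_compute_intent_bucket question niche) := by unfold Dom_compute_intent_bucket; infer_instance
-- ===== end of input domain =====

-- B replaces A's first-match if/elif cascade by a full scan of a flat keyword->priority map, taking the minimum matching priority to pick the bucket token; objective: alternative algorithm, same cost.


-- ===== PORT A =====
def compute_intent_bucket (question : String) (niche : String) : String :=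
  let q_lower := PySem.Str.lower question
  if ["when", "timing", "date", "period"].any (fun w => PySem.Str.isIn w q_lower) then
    if PySem.Str.isIn "marriage" q_lower || PySem.Str.isIn "spouse" q_lower then
      "timing_marriage_" ++ PySem.Str.replace (PySem.Str.lower niche) " " "_"
    else if PySem.Str.isIn "job" q_lower || PySem.Str.isIn "career" q_lower then
      "timing_career_" ++ PySem.Str.replace (PySem.Str.lower niche) " " "_"
    else
      "timing_general_" ++ PySem.Str.replace (PySem.Str.lower niche) " " "_"
  else if ["look", "appear", "beautiful", "handsome"].any (fun w => PySem.Str.isIn w q_lower) then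
    "appearance_spouse_" ++ PySem.Str.replace (PySem.Str.lower niche) " " "_"
  else if ["personality", "nature", "like", "character"].any (fun w => PySem.Str.isIn w q_lower) then
    "personality_spouse_" ++ PySem.Str.replace (PySem.Str.lower niche) " " "_"
  else if PySem.Str.isIn "where" q_lower || PySem.Str.isIn "meet" q_lower then
    "location_meeting_" ++ PySem.Str.replace (PySem.Str.lower niche) " " "_"
  else
    "general_" ++ PySem.Str.replace (PySem.Str.lower niche) " " "_"

-- ===== PORT B =====
-- flat keyword -> category-priority map (1 timing, 2 appearance, 3 personality, 4 location)
def pvKW : List (String × Nat) :=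
  [("when", 1), ("timing", 1), ("date", 1), ("period", 1),
   ("look", 2), ("appear", 2), ("beautiful", 2), ("handsome", 2),
   ("personality", 3), ("nature", 3), ("like", 3), ("character", 3),
   ("where", 4), ("meet", 4)]

def pvSUB : List (String × Nat) := [("marriage", 1), ("spouse", 1), ("job", 2), ("career", 2)]

-- min over the matched priorities with a default (the Python `min((p for w,p in T if w in q), default=d)`)
def pvMinPrioB (dflt : Nat) : List (Bool × Nat) → Nat
  | [] => dflt
  | (b, p) :: rest =>
    let r := pvMinPrioB dflt rest
    if b then Nat.min p r else r

def pvMinPrio (q : String) (dflt : Nat) (table : List (String × Nat)) : Nat :=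
  pvMinPrioB dflt (table.map (fun wp => (PySem.Str.isIn wp.1 q, wp.2)))

def pvTimingTokens : List String := ["timing_marriage", "timing_career", "timing_general"]
def pvTokens : List String := ["", "appearance_spouse", "personality_spouse", "location_meeting", "general"]

def compute_intent_bucket_alt (question : String) (niche : String) : String :=
  let q := PySem.Str.lower question
  let suffix := PySem.Str.replace (PySem.Str.lower niche) " " "_"
  let cat := pvMinPrio q 5 pvKW
  let token :=
    if cat = 1 then
      let sub := pvMinPrio q 3 pvSUB
      pvTimingTokens.getD (sub - 1) ""
    else
      pvTokens.getD (cat - 1) ""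
  token ++ "_" ++ suffix

-- ===== PRECONDITION & SPEC =====
def Spec_compute_intent_bucket (question : String) (niche : String) (out : String) : Prop := out = compute_intent_bucket_alt question niche
instance (question : String) (niche : String) (out : String) : Decidable (Spec_compute_intent_bucket question niche out) := by unfold Spec_compute_intent_bucket; infer_instance

-- ===== CLAIM =====
def Claim_equal_compute_intent_bucket : Prop := ∀ (question : String) (niche : String), Dom_compute_intent_bucket question niche → Spec_compute_intent_bucket question niche (compute_intent_bucket question niche)

-- ===== LEMMAS AND PROOFS =====

-- the min-fold over the 14-entry table equals first-matching-group priority (all 2^14 Bool cases)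
lemma pvMinKW_bool (b1 b2 b3 b4 b5 b6 b7 b8 b9 b10 b11 b12 b13 b14 : Bool) :
    pvMinPrioB 5 [(b1,1),(b2,1),(b3,1),(b4,1),(b5,2),(b6,2),(b7,2),(b8,2),
                  (b9,3),(b10,3),(b11,3),(b12,3),(b13,4),(b14,4)] =
    (if b1 || b2 || b3 || b4 then 1
     else if b5 || b6 || b7 || b8 then 2
     else if b9 || b10 || b11 || b12 then 3
     else if b13 || b14 then 4
     else 5) := by
  revert b1 b2 b3 b4 b5 b6 b7 b8 b9 b10 b11 b12 b13 b14
  decide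

lemma pvMinSub_bool (c1 c2 c3 c4 : Bool) :
    pvMinPrioB 3 [(c1,1),(c2,1),(c3,2),(c4,2)] =
    (if c1 || c2 then 1 else if c3 || c4 then 2 else 3) := by
  revert c1 c2 c3 c4
  decide

lemma pvCat_eq (q : String) : pvMinPrio q 5 pvKW =
    (if PySem.Str.isIn "when" q || PySem.Str.isIn "timing" q || PySem.Str.isIn "date" q || PySem.Str.isIn "period" q then 1
     else if PySem.Str.isIn "look" q || PySem.Str.isIn "appear" q || PySem.Str.isIn "beautiful" q || PySem.Str.isIn "handsome" q then 2
     else if PySem.Str.isIn "personality" q || PySem.Str.isIn "nature" q || PySem.Str.isIn "like" q || PySem.Str.isIn "character" q then 3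
     else if PySem.Str.isIn "where" q || PySem.Str.isIn "meet" q then 4
     else 5) := by
  simp only [pvMinPrio, pvKW, List.map]
  exact pvMinKW_bool _ _ _ _ _ _ _ _ _ _ _ _ _ _

lemma pvSub_eq (q : String) : pvMinPrio q 3 pvSUB =
    (if PySem.Str.isIn "marriage" q || PySem.Str.isIn "spouse" q then 1
     else if PySem.Str.isIn "job" q || PySem.Str.isIn "career" q then 2
     else 3) := by
  simp only [pvMinPrio, pvSUB, List.map]
  exact pvMinSub_bool _ _ _ _

-- ===== VERDICT =====
theorem compute_intent_bucket_spec : Claim_equal_compute_intent_bucket := by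
  intro question niche _
  unfold Spec_compute_intent_bucket compute_intent_bucket compute_intent_bucket_alt
  simp only [pvCat_eq, pvSub_eq, pvTimingTokens, pvTokens,
    List.any_cons, List.any_nil, Bool.or_false]
  split_ifs <;> simp_all
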